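-- pv_equiv track=rewrite | github.com/aayostem/Graph-Mastery | 01. BFS/main.py | count_connected_components
-- ===== SOURCE A (Python) =====
-- import collections
--
-- def count_connected_components(num_vertices, adj_list):
--     """
--     Counts the number of connected components in an undirected graph.
--
--     Args:
--         num_vertices (int): The total number of vertices.
--         adj_list (dict): The adjacency list representation of the graph.
--
--     Returns:
--         int: The number of connected components.
--     """
--     visited = [False] * num_vertices
--     components = 0
--
--     def bfs_component(start_node):
--         queue = collections.deque([start_node])
--         visited[start_node] = True
--         while queue:
--             u = queue.popleft()
--             for v in adj_list[u]:
--                 if not visited[v]: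
--                     visited[v] = True
--                     queue.append(v)
--
--     for i in range(num_vertices):
--         if not visited[i]:
--             components += 1
--             bfs_component(i)  # Can use DFS here too
--
--     return components
-- ===== SOURCE B (Python) =====
-- def count_connected_components(num_vertices, adj_list):
--     visited = [False] * num_vertices
--     components = 0
--     for i in range(num_vertices):
--         if visited[i]:
--             continue
--         components += 1
--         stack = [i]
--         while stack:
--             u = stack.pop()
--             if visited[u]:
--                 continue
--             visited[u] = True
--             for v in adj_list[u]:
--                 if not visited[v]:
--                     stack.append(v)
--     return components
-- ===== Notes on version B (the rewrite author's own statement) =====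
-- stated objective: alternative
-- what changed: BFS with a collections.deque and mark-on-enqueue is replaced by an iterative depth-first search with an explicit stack and deferred marking (vertices are marked when popped, stale stack entries are skipped), removing the deque and the inner helper function; the visited closure is order-independent, so the component count is identical.
-- outside the precondition, e.g. on count_connected_components(2, {0: [1, -1], 1: []}): A returns 1, B raises KeyError; on count_connected_components(3, {0: [], 1: [2, -1, -2], 2: []}): A returns 2, B raises KeyError
import Mathlib
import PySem

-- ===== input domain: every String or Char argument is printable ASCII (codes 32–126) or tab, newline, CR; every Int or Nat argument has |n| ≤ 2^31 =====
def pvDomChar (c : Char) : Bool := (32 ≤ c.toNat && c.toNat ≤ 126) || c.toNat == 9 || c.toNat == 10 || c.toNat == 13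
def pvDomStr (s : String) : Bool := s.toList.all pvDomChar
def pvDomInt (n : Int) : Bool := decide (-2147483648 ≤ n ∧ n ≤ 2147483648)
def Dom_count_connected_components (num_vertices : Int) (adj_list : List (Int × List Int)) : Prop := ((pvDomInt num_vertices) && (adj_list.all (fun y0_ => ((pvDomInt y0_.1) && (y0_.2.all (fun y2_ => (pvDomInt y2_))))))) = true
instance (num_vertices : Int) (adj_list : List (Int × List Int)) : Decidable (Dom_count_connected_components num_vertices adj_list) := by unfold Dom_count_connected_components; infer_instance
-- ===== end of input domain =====

-- B replaces A's deque-BFS with an explicit-stack DFS using deferred marking (mark on pop,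
-- skip stale stack entries); the visited closure is order-independent, so the count is equal.
-- Objective: alternative (same asymptotic cost, no deque and no inner helper function).

-- ===== PORT A =====

-- adj_list[u] : first-match association-list lookup (Python dict access; none = KeyError)
def ccAdj (adj : List (Int × List Int)) (u : Int) : Option (List Int) := adj.lookup u

-- number of unvisited vertices (termination measure only)
def ccUnvis (V : List Bool) : Nat := V.count false

-- A's inner neighbour loop: 'for v in adj_list[u]: if not visited[v]: visited[v] = True; queue.append(v)'
def ccScan (s : List Bool × List Int) (nbrs : List Int) : List Bool × List Int :=
  nbrs.foldl (fun s v =>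
    match PySem.List.pyGet? s.1 v with
    | some false => (PySem.List.pySetD s.1 v true, s.2 ++ [v])
    | _ => s) s

theorem ccUnvis_pySetD_true {V : List Bool} {v : Int}
    (h : PySem.List.pyGet? V v = some false) :
    ccUnvis (PySem.List.pySetD V v true) + 1 = ccUnvis V := by
  unfold PySem.List.pyGet? at h
  cases hk : PySem.List.pyIdx? V.length v with
  | none => rw [hk] at h; simp at h
  | some k =>
    rw [hk] at h; simp only [Option.bind_some] at h
    have hklt : k < V.length := by
      by_contra hc
      rw [List.getElem?_eq_none_iff.mpr (by omega)] at h; simp at h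
    have hgk : V[k] = false := by
      rw [List.getElem?_eq_getElem hklt] at h; simpa using h
    unfold ccUnvis PySem.List.pySetD PySem.List.pySet?
    rw [hk]
    simp only [Option.map_some, Option.getD_some]
    rw [List.count_set hklt]
    have hpos : 0 < List.count false V := by
      apply List.count_pos_iff.mpr
      rw [← hgk]; exact List.getElem_mem hklt
    simp [hgk]
    omega

theorem ccScan_measure (nbrs : List Int) : ∀ (V : List Bool) (E : List Int),
    ccUnvis (ccScan (V, E) nbrs).1 + (ccScan (V, E) nbrs).2.length ≤ ccUnvis V + E.length := by
  induction nbrs with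
  | nil => intro V E; simp [ccScan]
  | cons v rest ih =>
    intro V E
    show ccUnvis (ccScan _ rest).1 + (ccScan _ rest).2.length ≤ _
    cases hg : PySem.List.pyGet? V v with
    | none => simpa [hg] using ih V E
    | some b =>
      cases b with
      | true => simpa [hg] using ih V E
      | false =>
        have hm := ccUnvis_pySetD_true hg
        have := ih (PySem.List.pySetD V v true) (E ++ [v])
        simp only [hg] at *
        simp only [List.length_append, List.length_cons, List.length_nil] at this ⊢
        omega

-- A's BFS while-loop ('while queue: u = queue.popleft(); …'); on KeyError/IndexError
-- (impossible under Pre_) it bails out with the current visited list.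
def ccBfs (adj : List (Int × List Int)) (visited : List Bool) (queue : List Int) : List Bool :=
  match queue with
  | [] => visited
  | u :: qs =>
    match ccAdj adj u with
    | none => visited
    | some nbrs =>
      let p := ccScan (visited, []) nbrs
      ccBfs adj p.1 (qs ++ p.2)
termination_by 2 * ccUnvis visited + queue.length
decreasing_by
  have h := ccScan_measure nbrs visited []
  simp only [List.length_append, List.length_cons, List.length_nil, add_zero] at *
  omega

-- 'for i in range(num_vertices): if not visited[i]: components += 1; bfs_component(i)'
def count_connected_components (num_vertices : Int) (adj_list : List (Int × List Int)) : Int :=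
  let r := (PySem.List.pyRange 0 num_vertices 1).foldl
    (fun (s : List Bool × Int) i =>
      match PySem.List.pyGet? s.1 i with
      | some false => (ccBfs adj_list (PySem.List.pySetD s.1 i true) [i], s.2 + 1)
      | _ => s)
    (List.replicate num_vertices.toNat false, 0)
  r.2

-- ===== PORT B =====

-- total size of the adjacency lists (termination measure only)
def ccAdjSize (adj : List (Int × List Int)) : Nat := (adj.map (fun p => p.2.length)).sum

-- B's push loop: 'for v in adj_list[u]: if not visited[v]: stack.append(v)' (no marking here)
def ccPush (visited : List Bool) (acc : List Int) (nbrs : List Int) : List Int :=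
  nbrs.foldl (fun acc v =>
    match PySem.List.pyGet? visited v with
    | some false => acc ++ [v]
    | _ => acc) acc

theorem ccPush_length (visited : List Bool) (nbrs : List Int) : ∀ acc : List Int,
    (ccPush visited acc nbrs).length ≤ acc.length + nbrs.length := by
  induction nbrs with
  | nil => intro acc; simp [ccPush]
  | cons v rest ih =>
    intro acc
    show (ccPush visited _ rest).length ≤ _
    cases hg : PySem.List.pyGet? visited v with
    | none => simpa [hg] using (ih acc).trans (by simp)
    | some b =>
      cases b with
      | true => simpa [hg] using (ih acc).trans (by simp)
      | false =>
        have := ih (acc ++ [v])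
        simp only [hg, List.length_append, List.length_cons, List.length_nil] at this ⊢
        omega

theorem ccAdj_length_le {adj : List (Int × List Int)} {u : Int} {nbrs : List Int}
    (h : ccAdj adj u = some nbrs) : nbrs.length ≤ ccAdjSize adj := by
  induction adj with
  | nil => simp [ccAdj] at h
  | cons p rest ih =>
    unfold ccAdj at h
    rw [List.lookup_cons] at h
    unfold ccAdjSize
    cases he : u == p.1 with
    | true =>
      rw [he] at h
      have h2 : some p.2 = some nbrs := h
      cases h2
      simp
    | false =>
      rw [he] at h
      have h2 : List.lookup u rest = some nbrs := h
      have := ih (h := h2)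
      simp only [List.map_cons, List.sum_cons]
      unfold ccAdjSize at this
      omega

-- B's DFS while-loop: pop the top of the stack, skip it if already visited,
-- otherwise mark it and push its unvisited neighbours.
def ccDfs (adj : List (Int × List Int)) (visited : List Bool) (stack : List Int) : List Bool :=
  match h : stack.getLast? with
  | none => visited
  | some u =>
    match hv : PySem.List.pyGet? visited u with
    | none => visited
    | some true => ccDfs adj visited stack.dropLast
    | some false =>
      let visited' := PySem.List.pySetD visited u true
      match hn : ccAdj adj u with
      | none => visited'
      | some nbrs => ccDfs adj visited' (stack.dropLast ++ ccPush visited' [] nbrs)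
termination_by (1 + ccAdjSize adj) * ccUnvis visited + stack.length
decreasing_by
  · have hlen : stack ≠ [] := by intro h0; subst h0; simp at h
    have hd := stack.length_dropLast
    have : 0 < stack.length := List.length_pos_iff.mpr hlen
    omega
  · have hm : ccUnvis (PySem.List.pySetD visited u true) + 1 = ccUnvis visited :=
      ccUnvis_pySetD_true hv
    have hp := ccPush_length (PySem.List.pySetD visited u true) nbrs []
    have ha := ccAdj_length_le hn
    have hlen : stack ≠ [] := by intro h0; subst h0; simp at h
    have hpos : 0 < stack.length := List.length_pos_iff.mpr hlen
    have hd := stack.length_dropLast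
    simp only [List.length_append, List.length_nil, zero_add] at *
    rw [← hm, Nat.mul_add, Nat.mul_one]
    generalize (1 + ccAdjSize adj) * ccUnvis (PySem.List.pySetD visited u true) = M
    omega

-- 'for i in range(num_vertices): if visited[i]: continue; components += 1; <stack DFS>'
def count_connected_components_alt (num_vertices : Int) (adj_list : List (Int × List Int)) : Int :=
  let r := (PySem.List.pyRange 0 num_vertices 1).foldl
    (fun (s : List Bool × Int) i =>
      match PySem.List.pyGet? s.1 i with
      | some true => s
      | some false => (ccDfs adj_list s.1 [i], s.2 + 1)
      | none => s)
    (List.replicate num_vertices.toNat false, 0)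
  r.2

-- ===== PRECONDITION & SPEC =====
-- Pre_ excludes exactly the inputs on which A raises (KeyError on a vertex key missing from
-- adj_list, IndexError on a neighbour outside [-n, n)) together with the adjacency lists that
-- contain negative neighbour entries, on which A's negative-index wraparound into the visited
-- list is accidental (A may still return there; B may raise KeyError — see the cites).
def Pre_count_connected_components (num_vertices : Int) (adj_list : List (Int × List Int)) : Prop :=
  num_vertices ≤ (adj_list.length : Int) ∧
  ∀ i ∈ PySem.List.pyRange 0 num_vertices 1,
    (adj_list.lookup i).isSome = true ∧
    ∀ v ∈ (adj_list.lookup i).getD [], 0 ≤ v ∧ v < num_vertices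
instance (num_vertices : Int) (adj_list : List (Int × List Int)) : Decidable (Pre_count_connected_components num_vertices adj_list) := by unfold Pre_count_connected_components; infer_instance

def pvWitness_count_connected_components : Int × (List (Int × List Int)) :=
  (4, [(0, [1]), (1, [0]), (2, []), (3, [3])])

def Spec_count_connected_components (num_vertices : Int) (adj_list : List (Int × List Int)) (out : Int) : Prop := out = count_connected_components_alt num_vertices adj_list
instance (num_vertices : Int) (adj_list : List (Int × List Int)) (out : Int) : Decidable (Spec_count_connected_components num_vertices adj_list out) := by unfold Spec_count_connected_components; infer_instance

-- ===== CLAIM (what is proved, stated in full; the proofs are below) =====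
def Claim_equal_count_connected_components : Prop := ∀ (num_vertices : Int) (adj_list : List (Int × List Int)), Dom_count_connected_components num_vertices adj_list → Pre_count_connected_components num_vertices adj_list → Spec_count_connected_components num_vertices adj_list (count_connected_components num_vertices adj_list)

-- ===== LEMMAS AND PROOFS =====

-- x is a marked (visited) vertex of V
def Memv (V : List Bool) (x : Int) : Prop := 0 ≤ x ∧ V[x.toNat]? = some true

-- the neighbour list of u (empty when the key is absent)
def AdjL (adj : List (Int × List Int)) (u : Int) : List Int := (ccAdj adj u).getD []

-- closure of a vertex set P under following adjacency edges
inductive Cl (adj : List (Int × List Int)) (P : Int → Prop) : Int → Prop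
  | base (x : Int) : P x → Cl adj P x
  | step (u v : Int) : Cl adj P u → v ∈ AdjL adj u → Cl adj P v

-- every vertex of [0, n) has a key with all neighbours in [0, n)
def GoodAdj (n : Int) (adj : List (Int × List Int)) : Prop :=
  ∀ i : Int, 0 ≤ i → i < n → (ccAdj adj i).isSome = true ∧ ∀ v ∈ AdjL adj i, 0 ≤ v ∧ v < n

theorem Cl_mono {adj : List (Int × List Int)} {P Q : Int → Prop} (h : ∀ x, P x → Q x) :
    ∀ {x}, Cl adj P x → Cl adj Q x := by
  intro x hx
  induction hx with
  | base y hy => exact Cl.base y (h y hy)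
  | step u v _ he ih => exact Cl.step u v ih he

theorem Cl_bind {adj : List (Int × List Int)} {P Q : Int → Prop} (h : ∀ x, Q x → Cl adj P x) :
    ∀ {x}, Cl adj Q x → Cl adj P x := by
  intro x hx
  induction hx with
  | base y hy => exact h y hy
  | step u v _ he ih => exact Cl.step u v ih he

theorem Cl_closed {adj : List (Int × List Int)} {P : Int → Prop}
    (h : ∀ w, P w → ∀ v ∈ AdjL adj w, P v) : ∀ {x}, Cl adj P x → P x := by
  intro x hx
  induction hx with
  | base y hy => exact hy
  | step u v _ he ih => exact h u ih v he

theorem Memv_lt_length {V : List Bool} {x : Int} (h : Memv V x) : x < (V.length : Int) := by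
  obtain ⟨h0, h1⟩ := h
  have : x.toNat < V.length := by
    by_contra hc
    rw [List.getElem?_eq_none_iff.mpr (by omega)] at h1; simp at h1
  omega

theorem Memv_pySetD {V : List Bool} {v x : Int} (h0 : 0 ≤ v) (h1 : v < (V.length : Int)) :
    Memv (PySem.List.pySetD V v true) x ↔ Memv V x ∨ x = v := by
  rw [PySem.List.pySetD_of_nonneg V true h0]
  unfold Memv
  by_cases hx : 0 ≤ x
  · simp only [hx, true_and]
    rw [List.getElem?_set]
    by_cases he : v.toNat = x.toNat
    · have hxe : x = v := by omega
      subst hxe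
      simp [show x.toNat < V.length by omega]
    · have hne : x ≠ v := by intro he2; subst he2; omega
      simp [he, hne]
  · simp [hx]; omega



-- characterisation of A's neighbour scan
theorem ccScan_spec (nbrs : List Int) : ∀ (V : List Bool) (E : List Int),
    (∀ v ∈ nbrs, 0 ≤ v ∧ v < (V.length : Int)) →
    ∃ D : List Int,
      (ccScan (V, E) nbrs).1.length = V.length ∧
      (ccScan (V, E) nbrs).2 = E ++ D ∧
      (∀ d ∈ D, d ∈ nbrs) ∧
      (∀ x, Memv (ccScan (V, E) nbrs).1 x ↔ Memv V x ∨ x ∈ D) ∧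
      (∀ v ∈ nbrs, Memv (ccScan (V, E) nbrs).1 v) := by
  induction nbrs with
  | nil =>
    intro V E _
    exact ⟨[], by simp [ccScan], by simp [ccScan], by simp, by simp [ccScan], by simp⟩
  | cons v rest ih =>
    intro V E hr
    obtain ⟨hv0, hv1⟩ := hr v (by simp)
    have hrr : ∀ w ∈ rest, 0 ≤ w ∧ w < (V.length : Int) := fun w hw => hr w (by simp [hw])
    have hget := PySem.List.pyGet?_eq_some_getElem V hv0 hv1
    have hstep : ∀ s' , s' = (if V[v.toNat]'(by omega) then (V, E)
        else (PySem.List.pySetD V v true, E ++ [v])) →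
        ccScan (V, E) (v :: rest) = ccScan s' rest := by
      intro s' hs'
      show ccScan (match PySem.List.pyGet? V v with
        | some false => (PySem.List.pySetD V v true, E ++ [v])
        | _ => (V, E)) rest = _
      rw [hget]
      cases hb : V[v.toNat]'(by omega) <;> simp [hb] at hs' <;> rw [hs']
    cases hb : V[v.toNat]'(by omega) with
    | true =>
      rw [hstep (V, E) (by simp [hb])]
      obtain ⟨D, c1, c2, c3, c4, c5⟩ := ih V E hrr
      have hmv : Memv V v := ⟨hv0, by rw [List.getElem?_eq_getElem (by omega)]; simp [hb]⟩
      refine ⟨D, c1, c2, fun d hd => by simp [c3 d hd], c4, ?_⟩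
      intro w hw
      rcases List.mem_cons.mp hw with h | h
      · subst h; exact (c4 w).mpr (Or.inl hmv)
      · exact c5 w h
    | false =>
      rw [hstep (PySem.List.pySetD V v true, E ++ [v]) (by simp [hb])]
      have hlen1 : (PySem.List.pySetD V v true).length = V.length := PySem.List.length_pySetD V v true
      obtain ⟨D, c1, c2, c3, c4, c5⟩ := ih (PySem.List.pySetD V v true) (E ++ [v])
        (by rw [hlen1]; exact hrr)
      have hset := fun x => Memv_pySetD (V := V) (x := x) hv0 hv1
      refine ⟨v :: D, by rw [c1, hlen1], by rw [c2]; simp, ?_, ?_, ?_⟩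
      · intro d hd
        rcases List.mem_cons.mp hd with h | h
        · simp [h]
        · simp [c3 d h]
      · intro x
        rw [c4 x, hset x]
        simp [List.mem_cons]
        tauto
      · intro w hw
        rcases List.mem_cons.mp hw with h | h
        · subst h
          exact (c4 w).mpr (Or.inl ((hset w).mpr (Or.inr rfl)))
        · exact c5 w h

-- characterisation of B's push loop
theorem ccPush_spec (visited : List Bool) (nbrs : List Int)
    (hr : ∀ v ∈ nbrs, 0 ≤ v ∧ v < (visited.length : Int)) :
    ∃ D : List Int, ccPush visited [] nbrs = D ∧ (∀ d ∈ D, d ∈ nbrs) ∧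
      (∀ v ∈ nbrs, Memv visited v ∨ v ∈ D) := by
  suffices h : ∀ (nbrs : List Int), (∀ v ∈ nbrs, 0 ≤ v ∧ v < (visited.length : Int)) →
      ∀ acc : List Int, ∃ D : List Int, ccPush visited acc nbrs = acc ++ D ∧
      (∀ d ∈ D, d ∈ nbrs) ∧ (∀ v ∈ nbrs, Memv visited v ∨ v ∈ D) by
    obtain ⟨D, c1, c2, c3⟩ := h nbrs hr []
    exact ⟨D, by simpa using c1, c2, c3⟩
  clear hr nbrs
  intro nbrs
  induction nbrs with
  | nil => intro _ acc; exact ⟨[], by simp [ccPush], by simp, by simp⟩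
  | cons v rest ih =>
    intro hr acc
    obtain ⟨hv0, hv1⟩ := hr v (by simp)
    have hrr : ∀ w ∈ rest, 0 ≤ w ∧ w < (visited.length : Int) := fun w hw => hr w (by simp [hw])
    have hget := PySem.List.pyGet?_eq_some_getElem visited hv0 hv1
    have hstep : ∀ acc', acc' = (if visited[v.toNat]'(by omega) then acc else acc ++ [v]) →
        ccPush visited acc (v :: rest) = ccPush visited acc' rest := by
      intro acc' hs'
      show ccPush visited (match PySem.List.pyGet? visited v with
        | some false => acc ++ [v]
        | _ => acc) rest = _
      rw [hget]
      cases hb : visited[v.toNat]'(by omega) <;> simp [hb] at hs' <;> rw [hs']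
    cases hb : visited[v.toNat]'(by omega) with
    | true =>
      rw [hstep acc (by simp [hb])]
      obtain ⟨D, c1, c2, c3⟩ := ih hrr acc
      have hmv : Memv visited v := ⟨hv0, by rw [List.getElem?_eq_getElem (by omega)]; simp [hb]⟩
      refine ⟨D, c1, fun d hd => by simp [c2 d hd], ?_⟩
      intro w hw
      rcases List.mem_cons.mp hw with h | h
      · subst h; exact Or.inl hmv
      · rcases c3 w h with h' | h' <;> [exact Or.inl h'; exact Or.inr h']
    | false =>
      rw [hstep (acc ++ [v]) (by simp [hb])]
      obtain ⟨D, c1, c2, c3⟩ := ih hrr (acc ++ [v])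
      refine ⟨v :: D, by rw [c1]; simp, ?_, ?_⟩
      · intro d hd
        rcases List.mem_cons.mp hd with h | h
        · simp [h]
        · simp [c2 d h]
      · intro w hw
        rcases List.mem_cons.mp hw with h | h
        · subst h; exact Or.inr (by simp)
        · rcases c3 w h with h' | h' <;> [exact Or.inl h'; exact Or.inr (by simp [h'])]

-- A's BFS loop computes the closure of the visited set
theorem ccBfs_spec {n : Int} {adj : List (Int × List Int)} (hadj : GoodAdj n adj) :
    ∀ (m : Nat) (V : List Bool) (Q : List Int), 2 * ccUnvis V + Q.length ≤ m →
    V.length = n.toNat →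
    (∀ q ∈ Q, Memv V q) →
    (∀ w, Memv V w → w ∉ Q → ∀ v ∈ AdjL adj w, Memv V v) →
    (ccBfs adj V Q).length = V.length ∧
    (∀ x, Memv (ccBfs adj V Q) x ↔ Cl adj (Memv V) x) := by
  intro m
  induction m with
  | zero =>
    intro V Q hm hlen hQ hInv
    have hQnil : Q = [] := List.length_eq_zero_iff.mp (by omega)
    subst hQnil
    rw [ccBfs]
    refine ⟨rfl, fun x => ⟨fun h => Cl.base x h, fun h => ?_⟩⟩
    exact Cl_closed (fun w hw => hInv w hw (by simp)) h
  | succ m ih =>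
    intro V Q hm hlen hQ hInv
    cases Q with
    | nil =>
      rw [ccBfs]
      refine ⟨rfl, fun x => ⟨fun h => Cl.base x h, fun h => ?_⟩⟩
      exact Cl_closed (fun w hw => hInv w hw (by simp)) h
    | cons u qs =>
      have hmu : Memv V u := hQ u (by simp)
      have hu0 : 0 ≤ u := hmu.1
      have hulen : u < (V.length : Int) := Memv_lt_length hmu
      have hun : u < n := by omega
      have hnn : (V.length : Int) = n := by omega
      obtain ⟨hsome, hnr⟩ := hadj u hu0 hun
      obtain ⟨nbrs, hn⟩ := Option.isSome_iff_exists.mp hsome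
      have hAdjL : AdjL adj u = nbrs := by simp [AdjL, hn]
      have hnr' : ∀ v ∈ nbrs, 0 ≤ v ∧ v < (V.length : Int) := by
        intro v hv
        have := hnr v (by rw [hAdjL]; exact hv)
        omega
      obtain ⟨D, c1, c2, c3, c4, c5⟩ := ccScan_spec nbrs V [] hnr'
      simp only [List.nil_append] at c2
      have hunf : ccBfs adj V (u :: qs) = ccBfs adj (ccScan (V, []) nbrs).1 (qs ++ (ccScan (V, []) nbrs).2) := by
        rw [ccBfs, hn]
      have hmeas := ccScan_measure nbrs V []
      simp only [List.length_nil, add_zero] at hmeas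
      have hDlen : (ccScan (V, []) nbrs).2.length = D.length := by rw [c2]
      have hm' : 2 * ccUnvis (ccScan (V, []) nbrs).1 + (qs ++ (ccScan (V, []) nbrs).2).length ≤ m := by
        simp only [List.length_append, hDlen] at *
        simp only [List.length_cons] at hm
        omega
      have hres := ih (ccScan (V, []) nbrs).1 (qs ++ (ccScan (V, []) nbrs).2) hm'
        (by rw [c1, hlen])
        (by
          intro q hq
          rcases List.mem_append.mp hq with h | h
          · exact (c4 q).mpr (Or.inl (hQ q (by simp [h])))
          · rw [c2] at h
            exact c5 q (c3 q h))
        (by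
          intro w hw hwn v hv
          rcases (c4 w).mp hw with h | h
          · by_cases hwu : w = u
            · subst hwu
              rw [hAdjL] at hv
              exact c5 v hv
            · have : w ∉ u :: qs := by
                intro hmem
                rcases List.mem_cons.mp hmem with h' | h'
                · exact hwu h'
                · exact hwn (List.mem_append.mpr (Or.inl h'))
              exact (c4 v).mpr (Or.inl (hInv w h this v hv))
          · exact absurd (List.mem_append.mpr (Or.inr (by rw [c2]; exact h))) hwn)
      rw [hunf]
      refine ⟨hres.1.trans c1, fun x => ?_⟩
      rw [hres.2 x]
      constructor
      · intro h
        refine Cl_bind ?_ h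
        intro y hy
        rcases (c4 y).mp hy with h' | h'
        · exact Cl.base y h'
        · exact Cl.step u y (Cl.base u hmu) (by rw [hAdjL]; exact c3 y h')
      · intro h
        exact Cl_mono (fun y hy => (c4 y).mpr (Or.inl hy)) h

-- B's DFS loop computes the closure of visited ∪ stack
theorem ccDfs_unfold_nil (adj : List (Int × List Int)) (V : List Bool) :
    ccDfs adj V [] = V := by
  rw [ccDfs]
  rfl

theorem ccDfs_unfold_skip {adj : List (Int × List Int)} {V : List Bool} {S : List Int} {u : Int}
    (hL : S.getLast? = some u) (hv : PySem.List.pyGet? V u = some true) :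
    ccDfs adj V S = ccDfs adj V S.dropLast := by
  rw [ccDfs]
  split
  · rename_i heq; rw [heq] at hL; cases hL
  · rename_i u' heq
    rw [heq] at hL
    injection hL with hu; subst hu
    split
    · rename_i h2; rw [hv] at h2; cases h2
    · rfl
    · rename_i h2; rw [hv] at h2; cases h2

theorem ccDfs_unfold_mark {adj : List (Int × List Int)} {V : List Bool} {S : List Int} {u : Int}
    {nbrs : List Int}
    (hL : S.getLast? = some u) (hv : PySem.List.pyGet? V u = some false)
    (hn : ccAdj adj u = some nbrs) :
    ccDfs adj V S = ccDfs adj (PySem.List.pySetD V u true)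
      (S.dropLast ++ ccPush (PySem.List.pySetD V u true) [] nbrs) := by
  rw [ccDfs]
  split
  · rename_i heq; rw [heq] at hL; cases hL
  · rename_i u' heq
    rw [heq] at hL
    injection hL with hu; subst hu
    split
    · rename_i h2; rw [hv] at h2; cases h2
    · rename_i h2; rw [hv] at h2; cases h2
    · split
      · rename_i h3; rw [hn] at h3; cases h3
      · rename_i nbrs' h3
        rw [hn] at h3
        injection h3 with he; subst he
        rfl

theorem ccDfs_spec {n : Int} {adj : List (Int × List Int)} (hadj : GoodAdj n adj) :
    ∀ (m : Nat) (V : List Bool) (S : List Int),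
    (1 + ccAdjSize adj) * ccUnvis V + S.length ≤ m →
    V.length = n.toNat →
    (∀ s ∈ S, 0 ≤ s ∧ s < n) →
    (∀ w, Memv V w → ∀ v ∈ AdjL adj w, Memv V v ∨ v ∈ S) →
    (ccDfs adj V S).length = V.length ∧
    (∀ x, Memv (ccDfs adj V S) x ↔ Cl adj (fun y => Memv V y ∨ y ∈ S) x) := by
  intro m
  induction m with
  | zero =>
    intro V S hm hlen hS hInv
    have hSnil : S = [] := List.length_eq_zero_iff.mp (by omega)
    subst hSnil
    rw [ccDfs_unfold_nil]
    refine ⟨rfl, fun x => ⟨fun h => Cl.base x (Or.inl h), fun h => ?_⟩⟩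
    have := Cl_closed (P := fun y => Memv V y ∨ y ∈ ([] : List Int))
      (fun w hw v hv => ?_) h
    · tauto
    · rcases hw with hw | hw
      · rcases hInv w hw v hv with h' | h' <;> simp [h']
      · simp at hw
  | succ m ih =>
    intro V S hm hlen hS hInv
    cases hL : S.getLast? with
    | none =>
      have hSnil : S = [] := List.getLast?_eq_none_iff.mp hL
      subst hSnil
      rw [ccDfs_unfold_nil]
      refine ⟨rfl, fun x => ⟨fun h => Cl.base x (Or.inl h), fun h => ?_⟩⟩
      have := Cl_closed (P := fun y => Memv V y ∨ y ∈ ([] : List Int))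
        (fun w hw v hv => ?_) h
      · tauto
      · rcases hw with hw | hw
        · rcases hInv w hw v hv with h' | h' <;> simp [h']
        · simp at hw
    | some u =>
      have hne : S ≠ [] := by intro h0; subst h0; simp at hL
      have hSS : S.dropLast ++ [u] = S := List.dropLast_append_getLast? u hL
      have huS : u ∈ S := by rw [← hSS]; simp
      obtain ⟨hu0, hun⟩ := hS u huS
      have hnn : (V.length : Int) = n := by omega
      have hulen : u < (V.length : Int) := by omega
      have hget := PySem.List.pyGet?_eq_some_getElem V hu0 hulen
      have hrest : ∀ s ∈ S.dropLast, s ∈ S := by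
        intro s hs; rw [← hSS]; exact List.mem_append.mpr (Or.inl hs)
      cases hb : V[u.toNat]'(by omega) with
      | true =>
        have hmu : Memv V u := ⟨hu0, by rw [List.getElem?_eq_getElem (by omega)]; simp [hb]⟩
        have hunf : ccDfs adj V S = ccDfs adj V S.dropLast :=
          ccDfs_unfold_skip hL (by rw [hget, hb])
        have hm' : (1 + ccAdjSize adj) * ccUnvis V + S.dropLast.length ≤ m := by
          have := S.length_dropLast
          have : 0 < S.length := List.length_pos_iff.mpr hne
          omega
        have hres := ih V S.dropLast hm' hlen
          (fun s hs => hS s (hrest s hs))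
          (by
            intro w hw v hv
            rcases hInv w hw v hv with h' | h'
            · exact Or.inl h'
            · rw [← hSS] at h'
              rcases List.mem_append.mp h' with h'' | h''
              · exact Or.inr h''
              · simp at h''
                subst h''
                exact Or.inl hmu)
        rw [hunf]
        refine ⟨hres.1, fun x => ?_⟩
        rw [hres.2 x]
        constructor
        · intro h
          refine Cl_mono ?_ h
          intro y hy
          rcases hy with h' | h'
          · exact Or.inl h'
          · exact Or.inr (hrest y h')
        · intro h
          refine Cl_bind ?_ h
          intro y hy
          rcases hy with h' | h'
          · exact Cl.base y (Or.inl h')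
          · rw [← hSS] at h'
            rcases List.mem_append.mp h' with h'' | h''
            · exact Cl.base y (Or.inr h'')
            · simp at h''
              subst h''
              exact Cl.base y (Or.inl hmu)
      | false =>
        obtain ⟨hsome, hnr⟩ := hadj u hu0 hun
        obtain ⟨nbrs, hn⟩ := Option.isSome_iff_exists.mp hsome
        have hAdjL : AdjL adj u = nbrs := by simp [AdjL, hn]
        have hV' : ∀ x, Memv (PySem.List.pySetD V u true) x ↔ Memv V x ∨ x = u :=
          fun x => Memv_pySetD (V := V) (v := u) (x := x) hu0 hulen
        have hlen' : (PySem.List.pySetD V u true).length = V.length :=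
          PySem.List.length_pySetD V u true
        have hmu' : Memv (PySem.List.pySetD V u true) u := (hV' u).mpr (Or.inr rfl)
        have hnr' : ∀ v ∈ nbrs, 0 ≤ v ∧ v < ((PySem.List.pySetD V u true).length : Int) := by
          intro v hv
          have := hnr v (by rw [hAdjL]; exact hv)
          omega
        obtain ⟨D, c1, c2, c3⟩ := ccPush_spec (PySem.List.pySetD V u true) nbrs hnr'
        have hunf : ccDfs adj V S =
            ccDfs adj (PySem.List.pySetD V u true) (S.dropLast ++ ccPush (PySem.List.pySetD V u true) [] nbrs) :=
          ccDfs_unfold_mark hL (by rw [hget, hb]) hn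
        have hgf : PySem.List.pyGet? V u = some false := by rw [hget, hb]
        have hcnt := ccUnvis_pySetD_true hgf
        have hm' : (1 + ccAdjSize adj) * ccUnvis (PySem.List.pySetD V u true) +
            (S.dropLast ++ ccPush (PySem.List.pySetD V u true) [] nbrs).length ≤ m := by
          have hp := ccPush_length (PySem.List.pySetD V u true) nbrs []
          have ha := ccAdj_length_le hn
          have hd := S.length_dropLast
          have hpos : 0 < S.length := List.length_pos_iff.mpr hne
          rw [← hcnt, Nat.mul_add, Nat.mul_one] at hm
          simp only [List.length_append, List.length_nil, zero_add] at *
          generalize (1 + ccAdjSize adj) * ccUnvis (PySem.List.pySetD V u true) = M at *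
          omega
        have hres := ih (PySem.List.pySetD V u true)
          (S.dropLast ++ ccPush (PySem.List.pySetD V u true) [] nbrs) hm'
          (by rw [hlen', hlen])
          (by
            intro s hs
            rcases List.mem_append.mp hs with h' | h'
            · exact hS s (hrest s h')
            · rw [c1] at h'
              have := hnr s (by rw [hAdjL]; exact c2 s h')
              omega)
          (by
            intro w hw v hv
            rcases (hV' w).mp hw with h' | h'
            · rcases hInv w h' v hv with h'' | h''
              · exact Or.inl ((hV' v).mpr (Or.inl h''))
              · rw [← hSS] at h''
                rcases List.mem_append.mp h'' with h3 | h3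
                · exact Or.inr (List.mem_append.mpr (Or.inl h3))
                · simp at h3
                  subst h3
                  exact Or.inl hmu'
            · subst h'
              rw [hAdjL] at hv
              rcases c3 v hv with h'' | h''
              · exact Or.inl h''
              · exact Or.inr (List.mem_append.mpr (Or.inr (by rw [c1]; exact h''))))
        rw [hunf]
        refine ⟨hres.1.trans hlen', fun x => ?_⟩
        rw [hres.2 x]
        constructor
        · intro h
          refine Cl_bind ?_ h
          intro y hy
          rcases hy with h' | h'
          · rcases (hV' y).mp h' with h'' | h''
            · exact Cl.base y (Or.inl h'')
            · subst h''
              exact Cl.base y (Or.inr huS)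
          · rcases List.mem_append.mp h' with h'' | h''
            · exact Cl.base y (Or.inr (hrest y h''))
            · rw [c1] at h''
              exact Cl.step u y (Cl.base u (Or.inr huS)) (by rw [hAdjL]; exact c2 y h'')
        · intro h
          refine Cl_bind ?_ h
          intro y hy
          rcases hy with h' | h'
          · exact Cl.base y (Or.inl ((hV' y).mpr (Or.inl h')))
          · rw [← hSS] at h'
            rcases List.mem_append.mp h' with h'' | h''
            · exact Cl.base y (Or.inr (List.mem_append.mpr (Or.inl h'')))
            · simp at h''
              subst h''
              exact Cl.base y (Or.inl hmu')

-- the two stage results are the same list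
theorem stage_eq {n : Int} {adj : List (Int × List Int)} (hadj : GoodAdj n adj)
    {V : List Bool} {i : Int} (hlen : V.length = n.toNat)
    (hclosed : ∀ w, Memv V w → ∀ v ∈ AdjL adj w, Memv V v)
    (h0 : 0 ≤ i) (h1 : i < n) :
    ccBfs adj (PySem.List.pySetD V i true) [i] = ccDfs adj V [i] ∧
    (ccDfs adj V [i]).length = n.toNat ∧
    (∀ w, Memv (ccDfs adj V [i]) w → ∀ v ∈ AdjL adj w, Memv (ccDfs adj V [i]) v) := by
  have hnn : (V.length : Int) = n := by omega
  have hilen : i < (V.length : Int) := by omega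
  have hV' : ∀ x, Memv (PySem.List.pySetD V i true) x ↔ Memv V x ∨ x = i :=
    fun x => Memv_pySetD (V := V) (v := i) (x := x) h0 hilen
  have hlen1 : (PySem.List.pySetD V i true).length = V.length := PySem.List.length_pySetD V i true
  have specA := ccBfs_spec hadj (2 * ccUnvis (PySem.List.pySetD V i true) + 1)
    (PySem.List.pySetD V i true) [i] (by simp)
    (by rw [hlen1, hlen])
    (by
      intro q hq
      simp at hq
      subst hq
      exact (hV' q).mpr (Or.inr rfl))
    (by
      intro w hw hwn v hv
      have hwi : w ≠ i := by simpa using hwn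
      rcases (hV' w).mp hw with h' | h'
      · exact (hV' v).mpr (Or.inl (hclosed w h' v hv))
      · exact absurd h' hwi)
  have specB := ccDfs_spec hadj ((1 + ccAdjSize adj) * ccUnvis V + 1) V [i] (by simp)
    hlen
    (by intro s hs; simp at hs; subst hs; exact ⟨h0, h1⟩)
    (fun w hw v hv => Or.inl (hclosed w hw v hv))
  have hpred : ∀ x, Cl adj (Memv (PySem.List.pySetD V i true)) x ↔
      Cl adj (fun y => Memv V y ∨ y ∈ [i]) x := by
    intro x
    constructor
    · exact Cl_mono (fun y hy => by rcases (hV' y).mp hy with h | h; exact Or.inl h; simp [h])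
    · exact Cl_mono (fun y hy => by
        rcases hy with h | h
        · exact (hV' y).mpr (Or.inl h)
        · simp at h; exact (hV' y).mpr (Or.inr h))
  have hiff : ∀ x, Memv (ccBfs adj (PySem.List.pySetD V i true) [i]) x ↔
      Memv (ccDfs adj V [i]) x := by
    intro x
    rw [specA.2 x, specB.2 x, hpred x]
  have hlA : (ccBfs adj (PySem.List.pySetD V i true) [i]).length = V.length := by
    rw [specA.1, hlen1]
  have hlB : (ccDfs adj V [i]).length = V.length := specB.1
  have heq : ccBfs adj (PySem.List.pySetD V i true) [i] = ccDfs adj V [i] := by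
    apply List.ext_getElem (by rw [hlA, hlB])
    intro k hk1 hk2
    have hx := hiff (k : Int)
    unfold Memv at hx
    simp only [Int.toNat_natCast, Int.natCast_nonneg, true_and] at hx
    rw [List.getElem?_eq_getElem hk1, List.getElem?_eq_getElem hk2] at hx
    simp only [Option.some_inj] at hx
    cases hA : (ccBfs adj (PySem.List.pySetD V i true) [i])[k] <;>
      cases hB : (ccDfs adj V [i])[k] <;> simp_all
  refine ⟨heq, by rw [hlB, hlen], ?_⟩
  intro w hw v hv
  exact (specB.2 v).mpr (Cl.step w v ((specB.2 w).mp hw) hv)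

-- the outer loops walk the same index list in lock step
theorem outer_eq {n : Int} {adj : List (Int × List Int)} (hadj : GoodAdj n adj) :
    ∀ (l : List Int) (V : List Bool) (c : Int), (∀ i ∈ l, 0 ≤ i ∧ i < n) →
    V.length = n.toNat →
    (∀ w, Memv V w → ∀ v ∈ AdjL adj w, Memv V v) →
    (l.foldl (fun (s : List Bool × Int) i =>
      match PySem.List.pyGet? s.1 i with
      | some false => (ccBfs adj (PySem.List.pySetD s.1 i true) [i], s.2 + 1)
      | _ => s) (V, c))
    = (l.foldl (fun (s : List Bool × Int) i =>
      match PySem.List.pyGet? s.1 i with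
      | some true => s
      | some false => (ccDfs adj s.1 [i], s.2 + 1)
      | none => s) (V, c)) := by
  intro l
  induction l with
  | nil => intro V c _ _ _; rfl
  | cons i rest ih =>
    intro V c hl hlen hclosed
    obtain ⟨h0, h1⟩ := hl i (by simp)
    have hilen : i < (V.length : Int) := by omega
    have hget := PySem.List.pyGet?_eq_some_getElem V h0 hilen
    show (List.foldl _ (match PySem.List.pyGet? V i with
      | some false => (ccBfs adj (PySem.List.pySetD V i true) [i], c + 1)
      | _ => (V, c)) rest)
      = (List.foldl _ (match PySem.List.pyGet? V i with
      | some true => (V, c)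
      | some false => (ccDfs adj V [i], c + 1)
      | none => (V, c)) rest)
    rw [hget]
    cases hb : V[i.toNat]'(by omega) with
    | true =>
      exact ih V c (fun j hj => hl j (by simp [hj])) hlen hclosed
    | false =>
      obtain ⟨heq, hlB, hclB⟩ := stage_eq hadj hlen hclosed h0 h1
      show List.foldl _ (ccBfs adj (PySem.List.pySetD V i true) [i], c + 1) rest
        = List.foldl _ (ccDfs adj V [i], c + 1) rest
      rw [heq]
      exact ih (ccDfs adj V [i]) (c + 1) (fun j hj => hl j (by simp [hj])) hlB hclB

-- ===== VERDICT (by name: the statement is the Claim_ definition above) =====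
theorem count_connected_components_spec : Claim_equal_count_connected_components := by
  intro num_vertices adj_list _ hpre
  unfold Spec_count_connected_components
  unfold count_connected_components count_connected_components_alt
  have hadj : GoodAdj num_vertices adj_list := by
    intro i hi0 hi1
    have hmem : i ∈ PySem.List.pyRange 0 num_vertices 1 := by
      rw [PySem.List.mem_pyRange_one]; omega
    obtain ⟨hsome, hbnd⟩ := hpre.2 i hmem
    refine ⟨hsome, ?_⟩
    intro v hv
    exact hbnd v (by simpa [AdjL, ccAdj] using hv)
  have hrange : ∀ i ∈ PySem.List.pyRange 0 num_vertices 1, 0 ≤ i ∧ i < num_vertices := by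
    intro i hi
    rw [PySem.List.mem_pyRange_one] at hi
    omega
  have hclosed0 : ∀ w, Memv (List.replicate num_vertices.toNat false) w →
      ∀ v ∈ AdjL adj_list w, Memv (List.replicate num_vertices.toNat false) v := by
    intro w hw
    exfalso
    obtain ⟨_, hw2⟩ := hw
    have hlt : w.toNat < num_vertices.toNat := by
      by_contra hc
      rw [List.getElem?_eq_none_iff.mpr (by simp only [List.length_replicate]; omega)] at hw2
      cases hw2
    rw [List.getElem?_eq_getElem (by simp only [List.length_replicate]; omega)] at hw2
    simp at hw2
  have h := outer_eq hadj (PySem.List.pyRange 0 num_vertices 1)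
    (List.replicate num_vertices.toNat false) 0 hrange (by simp) hclosed0
  simp only []
  rw [h]
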